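-- pv_equiv track=rewrite | github.com/naveenkewalramani/dsa-solutions | interview_questions/zalando/zalando_sde2_round1.py | buildPalindrome
-- ===== SOURCE A (Python) =====
-- def replaceQuestionMark(inputStr):
--     inputStrToList = list(inputStr)
--     n = len(inputStr)
--     for i in range(n//2):
--         left = inputStrToList[i]
--         right = inputStrToList[n-i-1]
--         if left == "?" and right == "?":
--             inputStrToList[i] = inputStrToList[n-i-1] = "a"
--         elif left == "?":
--             inputStrToList[i] = right
--         elif right == "?":
--             inputStrToList[n-i-1] = left
--         elif left != right:
--             return "NO"
--
--     if n %2 == 1 and inputStrToList[n//2] == "?":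
--         inputStrToList[n//2] = "a"
--
--     return ''.join(inputStrToList)
--
-- def formatString(inputStr):
--     s = list(inputStr)
--     response = []
--     for element in s:
--         if element == "?":
--             response.append(element)
--         elif element.isalpha():
--             response.append(element.lower())
--     return "".join(response)
--
-- def buildPalindrome(inputStr):
--     parsedStr = formatString(inputStr)
--     updatedStr = replaceQuestionMark(parsedStr)
--     if updatedStr == "NO":
--         return len(inputStr) // 2 * "no"
--     else:
--         responseStr = ""
--         index = 0
--         for i in inputStr:
--             if i == "?" or i.isalpha():
--                 responseStr += updatedStr[index]
--                 index+=1
--             else: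
--                 responseStr += i
--     return responseStr
-- ===== SOURCE B (Python) =====
-- def buildPalindrome(inputStr):
--     chars = [c.lower() if c.isalpha() else c for c in inputStr]
--     idx = [i for i, c in enumerate(chars) if c == '?' or c.isalpha()]
--     m = len(idx)
--     for k in range(m // 2):
--         a, b = idx[k], idx[m - 1 - k]
--         ca, cb = chars[a], chars[b]
--         if ca == '?' and cb == '?':
--             chars[a] = chars[b] = 'a'
--         elif ca == '?':
--             chars[a] = cb
--         elif cb == '?':
--             chars[b] = ca
--         elif ca != cb:
--             return len(inputStr) // 2 * 'no'
--     if m % 2 == 1 and chars[idx[m // 2]] == '?':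
--         chars[idx[m // 2]] = 'a'
--     return ''.join(chars)
-- ===== Notes on version B (the rewrite author's own statement) =====
-- stated objective: alternative
-- what changed: B fuses A's three passes (filter to a reduced string, solve it in replaceQuestionMark, re-expand it through the original formatting) into a single index-guided pass: it lowercases one char-list copy, precomputes the list of relevant (alpha or '?') indices, and runs the two-pointer palindrome fill directly on the original positions, so no intermediate filtered string or reconstruction loop exists.
import Mathlib
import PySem

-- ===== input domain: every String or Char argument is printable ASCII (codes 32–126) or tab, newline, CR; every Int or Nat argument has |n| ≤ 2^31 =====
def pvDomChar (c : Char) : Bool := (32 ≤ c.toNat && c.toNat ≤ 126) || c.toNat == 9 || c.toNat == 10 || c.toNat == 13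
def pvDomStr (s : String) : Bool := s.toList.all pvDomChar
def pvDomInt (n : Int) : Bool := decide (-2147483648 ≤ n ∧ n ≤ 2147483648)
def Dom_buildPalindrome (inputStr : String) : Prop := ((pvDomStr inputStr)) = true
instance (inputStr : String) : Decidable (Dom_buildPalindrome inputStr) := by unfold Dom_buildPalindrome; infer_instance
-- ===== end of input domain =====

-- B fuses A's three passes (filter, solve on the filtered string, re-expand) into one
-- index-guided in-place pass over a single char list; same return value, alternative structure.

-- ===== PORT A =====
-- formatString: keep '?' and alphas (lowercased), via the same append-to-response loop
def buildPalindrome_fmtStep (resp : List Char) (c : Char) : List Char :=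
  if c = '?' then resp ++ [c]
  else if PySem.Chars.isalpha c then resp ++ [PySem.Chars.lowerChar c]
  else resp

def buildPalindrome_fmt (l : List Char) : List Char := l.foldl buildPalindrome_fmtStep []

-- replaceQuestionMark's loop body for i in range(n//2); `none` models the early `return "NO"`
-- (faithful: a formatted string consists of lowercase letters and '?' only, so it never equals "NO")
def buildPalindrome_rqmStep (n : Nat) (st : Option (List Char)) (i : Nat) : Option (List Char) :=
  match st with
  | none => none
  | some l =>
      let left := l.getD i ' '
      let right := l.getD (n - i - 1) ' '
      if left = '?' ∧ right = '?' then some ((l.set i 'a').set (n - i - 1) 'a')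
      else if left = '?' then some (l.set i right)
      else if right = '?' then some (l.set (n - i - 1) left)
      else if left ≠ right then none
      else some l

def buildPalindrome_rqm (l : List Char) : Option (List Char) :=
  let n := l.length
  match (List.range (n / 2)).foldl (buildPalindrome_rqmStep n) (some l) with
  | none => none
  | some l' =>
      if n % 2 = 1 ∧ l'.getD (n / 2) ' ' = '?' then some (l'.set (n / 2) 'a')
      else some l'

-- the reconstruction loop of buildPalindrome: (responseStr, index) accumulator
def buildPalindrome_reconStep (upd : List Char) (acc : List Char × Nat) (c : Char) : List Char × Nat :=
  if c = '?' ∨ PySem.Chars.isalpha c then (acc.1 ++ [upd.getD acc.2 ' '], acc.2 + 1)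
  else (acc.1 ++ [c], acc.2)

def buildPalindrome_core (l : List Char) : List Char :=
  let parsed := buildPalindrome_fmt l
  match buildPalindrome_rqm parsed with
  | none => (List.replicate (l.length / 2) ['n', 'o']).flatten  -- len(inputStr)//2 * "no"
  | some upd => (l.foldl (buildPalindrome_reconStep upd) ([], 0)).1

def buildPalindrome (inputStr : String) : String :=
  String.ofList (buildPalindrome_core inputStr.toList)

-- ===== PORT B =====
-- chars = [c.lower() if c.isalpha() else c for c in inputStr]
def buildPalindrome_altLower (l : List Char) : List Char :=
  l.map (fun c => if PySem.Chars.isalpha c then PySem.Chars.lowerChar c else c)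

-- idx = [i for i, c in enumerate(chars) if c == '?' or c.isalpha()]
def buildPalindrome_altIdx : List Char → Nat → List Nat
  | [], _ => []
  | c :: cs, i =>
      if c = '?' ∨ PySem.Chars.isalpha c then i :: buildPalindrome_altIdx cs (i + 1)
      else buildPalindrome_altIdx cs (i + 1)

-- loop body for k in range(m//2); `none` models the early `return len(inputStr)//2*'no'`
def buildPalindrome_altStep (idx : List Nat) (m : Nat) (st : Option (List Char)) (k : Nat) :
    Option (List Char) :=
  match st with
  | none => none
  | some chars =>
      let a := idx.getD k 0
      let b := idx.getD (m - 1 - k) 0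
      let ca := chars.getD a ' '
      let cb := chars.getD b ' '
      if ca = '?' ∧ cb = '?' then some ((chars.set a 'a').set b 'a')
      else if ca = '?' then some (chars.set a cb)
      else if cb = '?' then some (chars.set b ca)
      else if ca ≠ cb then none
      else some chars

def buildPalindrome_altCore (l : List Char) : List Char :=
  let chars := buildPalindrome_altLower l
  let idx := buildPalindrome_altIdx chars 0
  let m := idx.length
  match (List.range (m / 2)).foldl (buildPalindrome_altStep idx m) (some chars) with
  | none => (List.replicate (l.length / 2) ['n', 'o']).flatten  -- len(inputStr)//2 * 'no'
  | some chars' =>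
      if m % 2 = 1 ∧ chars'.getD (idx.getD (m / 2) 0) ' ' = '?' then
        chars'.set (idx.getD (m / 2) 0) 'a'
      else chars'

def buildPalindrome_alt (inputStr : String) : String :=
  String.ofList (buildPalindrome_altCore inputStr.toList)

-- ===== PRECONDITION & SPEC =====
def Spec_buildPalindrome (inputStr : String) (out : String) : Prop := out = buildPalindrome_alt inputStr
instance (inputStr : String) (out : String) : Decidable (Spec_buildPalindrome inputStr out) := by unfold Spec_buildPalindrome; infer_instance

-- ===== CLAIM (what is proved, stated in full; the proofs are below) =====
def Claim_equal_buildPalindrome : Prop := ∀ (inputStr : String), Dom_buildPalindrome inputStr → Spec_buildPalindrome inputStr (buildPalindrome inputStr)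

-- ===== LEMMAS AND PROOFS =====

-- "relevant" characters: the ones both programs operate on
def pvRel (c : Char) : Bool := decide (c = '?') || PySem.Chars.isalpha c
def pvLow (c : Char) : Char := if PySem.Chars.isalpha c then PySem.Chars.lowerChar c else c
-- A's filtered-and-lowercased string
def pvCore (l : List Char) : List Char := (l.filter pvRel).map pvLow
-- scatter vs back into the relevant positions of l (the shape of B's working list)
def pvSplice : List Char → List Char → List Char
  | [], _ => []
  | c :: cs, vs => if pvRel c then vs.headD c :: pvSplice cs vs.tail else c :: pvSplice cs vs

theorem pv_toNat_ofNat (n : Nat) (h : n.isValidChar) : (Char.ofNat n).toNat = n := by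
  simp [Char.ofNat, Char.toNat, Char.ofNatAux, h]

theorem pv_lower_alpha (c : Char) (h : PySem.Chars.isalpha c = true) :
    PySem.Chars.isalpha (PySem.Chars.lowerChar c) = true ∧ PySem.Chars.lowerChar c ≠ '?' := by
  simp only [PySem.Chars.isalpha, PySem.Chars.lowerChar, PySem.Chars.isupper, PySem.Chars.islower,
    Bool.or_eq_true, Bool.and_eq_true, decide_eq_true_eq] at *
  by_cases hu : ('A' ≤ c ∧ c ≤ 'Z')
  · have h1 : 65 ≤ c.toNat := hu.1
    have h2 : c.toNat ≤ 90 := hu.2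
    have hv : (c.toNat + 32).isValidChar := by left; omega
    have ht := pv_toNat_ofNat (c.toNat + 32) hv
    simp only [if_pos hu]
    refine ⟨Or.inr ⟨?_, ?_⟩, ?_⟩
    · show ('a').toNat ≤ (Char.ofNat (c.toNat + 32)).toNat
      have ea : ('a').toNat = 97 := rfl
      rw [ht]; omega
    · show (Char.ofNat (c.toNat + 32)).toNat ≤ ('z').toNat
      have ez : ('z').toNat = 122 := rfl
      rw [ht]; omega
    · intro hq
      have hT : (Char.ofNat (c.toNat + 32)).toNat = ('?').toNat := by rw [hq]
      rw [ht] at hT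
      have eq2 : ('?').toNat = 63 := rfl
      omega
  · simp only [if_neg hu]
    rcases h with ⟨h1, h2⟩ | ⟨h1, h2⟩
    · exact absurd ⟨h1, h2⟩ hu
    · refine ⟨Or.inr ⟨h1, h2⟩, ?_⟩
      intro hq
      have h1' : ('a').toNat ≤ c.toNat := h1
      subst hq
      have ea : ('a').toNat = 97 := rfl
      have eq2 : ('?').toNat = 63 := rfl
      omega

theorem pvRel_low (c : Char) : pvRel (pvLow c) = pvRel c := by
  by_cases h : PySem.Chars.isalpha c = true
  · obtain ⟨h1, _⟩ := pv_lower_alpha c h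
    simp [pvRel, pvLow, h, h1]
  · simp [pvRel, pvLow, h]

theorem pvRel_prop (c : Char) : (c = '?' ∨ PySem.Chars.isalpha c = true) ↔ pvRel c = true := by
  simp [pvRel]

theorem pvRel_false_of (c : Char) (h : ¬ (c = '?' ∨ PySem.Chars.isalpha c = true)) :
    pvRel c = false := by
  rcases not_or.1 h with ⟨h1, h2⟩
  simp [pvRel, h1, h2]

theorem pv_isalpha_false (c : Char) (h : pvRel c = false) : PySem.Chars.isalpha c = false := by
  simp [pvRel] at h
  exact h.2

-- A's formatString produces pvCore
theorem pv_fmt_aux (l : List Char) : ∀ acc : List Char,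
    l.foldl buildPalindrome_fmtStep acc = acc ++ pvCore l := by
  induction l with
  | nil => intro acc; simp [pvCore]
  | cons c cs ih =>
      intro acc
      by_cases hq : c = '?'
      · subst hq
        have ha : PySem.Chars.isalpha '?' = false := by decide
        simp [buildPalindrome_fmtStep, pvCore, pvRel, pvLow, ha, ih]
      · by_cases ha : PySem.Chars.isalpha c = true
        · simp [buildPalindrome_fmtStep, hq, ha, pvCore, pvRel, pvLow, ih]
        · simp [buildPalindrome_fmtStep, hq, ha, pvCore, pvRel, pvLow, ih]

theorem pv_fmt_eq (l : List Char) : buildPalindrome_fmt l = pvCore l := by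
  simpa using pv_fmt_aux l []

theorem pv_idx_shift (l : List Char) : ∀ i : Nat,
    buildPalindrome_altIdx l (i + 1) = (buildPalindrome_altIdx l i).map (· + 1) := by
  induction l with
  | nil => intro i; simp [buildPalindrome_altIdx]
  | cons c cs ih =>
      intro i
      by_cases h : (c = '?' ∨ PySem.Chars.isalpha c = true)
      · simp [buildPalindrome_altIdx, h, ih]
      · simp [buildPalindrome_altIdx, h, ih]

theorem pv_idx_length (l : List Char) : ∀ i : Nat,
    (buildPalindrome_altIdx l i).length = (pvCore l).length := by
  induction l with
  | nil => intro i; simp [buildPalindrome_altIdx, pvCore]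
  | cons c cs ih =>
      intro i
      by_cases h : (c = '?' ∨ PySem.Chars.isalpha c = true)
      · have hr : pvRel c = true := (pvRel_prop c).1 h
        have hcore : pvCore (c :: cs) = pvLow c :: pvCore cs := by simp [pvCore, hr]
        simp only [buildPalindrome_altIdx, if_pos h, List.length_cons, hcore]
        rw [ih (i + 1)]
      · have hr : pvRel c = false := pvRel_false_of c h
        have hcore : pvCore (c :: cs) = pvCore cs := by simp [pvCore, hr]
        simp only [buildPalindrome_altIdx, if_neg h, hcore]
        exact ih (i + 1)

theorem pv_idx_lower (l : List Char) : ∀ i : Nat,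
    buildPalindrome_altIdx (buildPalindrome_altLower l) i = buildPalindrome_altIdx l i := by
  induction l with
  | nil => intro i; simp [buildPalindrome_altIdx, buildPalindrome_altLower]
  | cons c cs ih =>
      intro i
      have key : ((pvLow c) = '?' ∨ PySem.Chars.isalpha (pvLow c) = true) ↔
          (c = '?' ∨ PySem.Chars.isalpha c = true) := by
        rw [pvRel_prop, pvRel_prop, pvRel_low]
      have hl : buildPalindrome_altLower (c :: cs) = pvLow c :: buildPalindrome_altLower cs := by
        simp [buildPalindrome_altLower, pvLow]
      rw [hl]
      by_cases h : (c = '?' ∨ PySem.Chars.isalpha c = true)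
      · simp [buildPalindrome_altIdx, h, key.2 h, ih]
      · have h' : ¬ ((pvLow c) = '?' ∨ PySem.Chars.isalpha (pvLow c) = true) := fun hh => h (key.1 hh)
        simp [buildPalindrome_altIdx, h, h', ih]

theorem pv_lower_splice (l : List Char) :
    buildPalindrome_altLower l = pvSplice l (pvCore l) := by
  induction l with
  | nil => simp [buildPalindrome_altLower, pvSplice]
  | cons c cs ih =>
      have hmap : buildPalindrome_altLower (c :: cs) = pvLow c :: buildPalindrome_altLower cs := by
        simp [buildPalindrome_altLower, pvLow]
      rw [hmap]
      by_cases hr : pvRel c = true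
      · have hcore : pvCore (c :: cs) = pvLow c :: pvCore cs := by simp [pvCore, hr]
        rw [hcore]
        simp only [pvSplice, if_pos hr, List.headD_cons, List.tail_cons]
        rw [ih]
      · have hrf : pvRel c = false := by simpa using hr
        have ha : PySem.Chars.isalpha c = false := pv_isalpha_false c hrf
        have hcore : pvCore (c :: cs) = pvCore cs := by simp [pvCore, hrf]
        have hlc : pvLow c = c := by simp [pvLow, ha]
        rw [hcore, hlc]
        simp only [pvSplice, hrf, Bool.false_eq_true, if_false]
        rw [ih]

theorem pv_splice_getD (l : List Char) : ∀ (vs : List Char) (k : Nat) (d : Char),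
    vs.length = (buildPalindrome_altIdx l 0).length → k < vs.length →
    (pvSplice l vs).getD ((buildPalindrome_altIdx l 0).getD k 0) d = vs.getD k d := by
  induction l with
  | nil =>
      intro vs k d hlen hk
      have h0 : vs.length = 0 := by simpa [buildPalindrome_altIdx] using hlen
      omega
  | cons c cs ih =>
      intro vs k d hlen hk
      by_cases h : (c = '?' ∨ PySem.Chars.isalpha c = true)
      · have hr : pvRel c = true := (pvRel_prop c).1 h
        rw [buildPalindrome_altIdx] at hlen ⊢
        simp only [if_pos h] at hlen ⊢
        rw [pv_idx_shift] at hlen ⊢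
        obtain ⟨v, vs', rfl⟩ : ∃ v vs', vs = v :: vs' := by
          cases vs with
          | nil => simp at hk
          | cons v vs' => exact ⟨v, vs', rfl⟩
        simp only [List.length_cons, List.length_map] at hlen
        cases k with
        | zero => simp [pvSplice, hr]
        | succ k =>
            have hk' : k < vs'.length := by simp at hk; omega
            have hkidx : k < (buildPalindrome_altIdx cs 0).length := by omega
            have hmap : ((buildPalindrome_altIdx cs 0).map (· + 1)).getD k 0
                = (buildPalindrome_altIdx cs 0).getD k 0 + 1 := by
              rw [List.getD_eq_getElem?_getD, List.getElem?_map, List.getElem?_eq_getElem hkidx]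
              simp [List.getD_eq_getElem?_getD, List.getElem?_eq_getElem hkidx]
            simp only [List.getD_cons_succ]
            rw [hmap]
            simp only [pvSplice, hr, if_true, List.getD_cons_succ, List.headD_cons,
              List.tail_cons]
            exact ih vs' k d (by omega) hk'
      · have hr : pvRel c = false := pvRel_false_of c h
        rw [buildPalindrome_altIdx] at hlen ⊢
        simp only [if_neg h] at hlen ⊢
        rw [pv_idx_shift] at hlen ⊢
        simp only [List.length_map] at hlen
        have hkidx : k < (buildPalindrome_altIdx cs 0).length := by omega
        have hmap : ((buildPalindrome_altIdx cs 0).map (· + 1)).getD k 0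
            = (buildPalindrome_altIdx cs 0).getD k 0 + 1 := by
          rw [List.getD_eq_getElem?_getD, List.getElem?_map, List.getElem?_eq_getElem hkidx]
          simp [List.getD_eq_getElem?_getD, List.getElem?_eq_getElem hkidx]
        rw [hmap]
        simp only [pvSplice, hr, Bool.false_eq_true, if_false, List.getD_cons_succ]
        exact ih vs k d (by omega) hk

theorem pv_splice_set (l : List Char) : ∀ (vs : List Char) (k : Nat) (x : Char),
    vs.length = (buildPalindrome_altIdx l 0).length → k < vs.length →
    (pvSplice l vs).set ((buildPalindrome_altIdx l 0).getD k 0) x = pvSplice l (vs.set k x) := by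
  induction l with
  | nil =>
      intro vs k x hlen hk
      have h0 : vs.length = 0 := by simpa [buildPalindrome_altIdx] using hlen
      omega
  | cons c cs ih =>
      intro vs k x hlen hk
      by_cases h : (c = '?' ∨ PySem.Chars.isalpha c = true)
      · have hr : pvRel c = true := (pvRel_prop c).1 h
        rw [buildPalindrome_altIdx] at hlen ⊢
        simp only [if_pos h] at hlen ⊢
        rw [pv_idx_shift] at hlen ⊢
        obtain ⟨v, vs', rfl⟩ : ∃ v vs', vs = v :: vs' := by
          cases vs with
          | nil => simp at hk
          | cons v vs' => exact ⟨v, vs', rfl⟩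
        simp only [List.length_cons, List.length_map] at hlen
        cases k with
        | zero => simp [pvSplice, hr]
        | succ k =>
            have hk' : k < vs'.length := by simp at hk; omega
            have hkidx : k < (buildPalindrome_altIdx cs 0).length := by omega
            have hmap : ((buildPalindrome_altIdx cs 0).map (· + 1)).getD k 0
                = (buildPalindrome_altIdx cs 0).getD k 0 + 1 := by
              rw [List.getD_eq_getElem?_getD, List.getElem?_map, List.getElem?_eq_getElem hkidx]
              simp [List.getD_eq_getElem?_getD, List.getElem?_eq_getElem hkidx]
            simp only [List.getD_cons_succ]
            rw [hmap]
            simp only [pvSplice, hr, if_true, List.set_cons_succ, List.headD_cons,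
              List.tail_cons]
            rw [ih vs' k x (by omega) hk']
      · have hr : pvRel c = false := pvRel_false_of c h
        rw [buildPalindrome_altIdx] at hlen ⊢
        simp only [if_neg h] at hlen ⊢
        rw [pv_idx_shift] at hlen ⊢
        simp only [List.length_map] at hlen
        have hkidx : k < (buildPalindrome_altIdx cs 0).length := by omega
        have hmap : ((buildPalindrome_altIdx cs 0).map (· + 1)).getD k 0
            = (buildPalindrome_altIdx cs 0).getD k 0 + 1 := by
          rw [List.getD_eq_getElem?_getD, List.getElem?_map, List.getElem?_eq_getElem hkidx]
          simp [List.getD_eq_getElem?_getD, List.getElem?_eq_getElem hkidx]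
        rw [hmap]
        simp only [pvSplice, hr, Bool.false_eq_true, if_false, List.set_cons_succ]
        rw [ih vs k x (by omega) hk]

-- A's reconstruction loop is exactly splicing vs back into l
theorem pv_recon (l : List Char) : ∀ (acc : List Char) (j : Nat) (upd : List Char),
    l.countP pvRel + j ≤ upd.length →
    (l.foldl (buildPalindrome_reconStep upd) (acc, j)).1 = acc ++ pvSplice l (upd.drop j) := by
  induction l with
  | nil => intro acc j upd h; simp [pvSplice]
  | cons c cs ih =>
      intro acc j upd h
      by_cases hc : (c = '?' ∨ PySem.Chars.isalpha c = true)
      · have hr : pvRel c = true := (pvRel_prop c).1 hc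
        have hcnt : (c :: cs).countP pvRel = cs.countP pvRel + 1 := by
          simp [List.countP_cons, hr]
        have hj : j < upd.length := by omega
        obtain ⟨v, rest, hd⟩ : ∃ v rest, upd.drop j = v :: rest := by
          cases hdrop : upd.drop j with
          | nil => have := List.drop_eq_nil_iff.1 hdrop; omega
          | cons v rest => exact ⟨v, rest, rfl⟩
        have hv : upd.getD j ' ' = v := by
          have h1 : upd[j]? = some v := by
            rw [← List.head?_drop, hd]; rfl
          simp [List.getD_eq_getElem?_getD, h1]
        have htl : upd.drop (j + 1) = rest := by
          rw [← List.tail_drop, hd]; rfl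
        simp only [List.foldl_cons, buildPalindrome_reconStep, if_pos hc]
        rw [ih (acc ++ [upd.getD j ' ']) (j + 1) upd (by omega)]
        rw [hv, htl, hd]
        simp [pvSplice, hr]
      · have hr : pvRel c = false := pvRel_false_of c hc
        have hcnt : (c :: cs).countP pvRel = cs.countP pvRel := by
          simp [List.countP_cons, hr]
        simp only [List.foldl_cons, buildPalindrome_reconStep, if_neg hc]
        rw [ih (acc ++ [c]) j upd (by omega)]
        simp [pvSplice, hr]

theorem pv_rqmStep_length (n : Nat) (vals w : List Char) (k : Nat)
    (h : buildPalindrome_rqmStep n (some vals) k = some w) : w.length = vals.length := by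
  simp only [buildPalindrome_rqmStep] at h
  split_ifs at h
  all_goals first
    | (simp only [Option.some.injEq] at h; subst h; simp)
    | simp at h

theorem pv_rqm_fold_none (n : Nat) (ks : List Nat) :
    ks.foldl (buildPalindrome_rqmStep n) none = none := by
  induction ks with
  | nil => rfl
  | cons k ks ih => simpa [buildPalindrome_rqmStep] using ih

theorem pv_alt_fold_none (idx : List Nat) (m : Nat) (ks : List Nat) :
    ks.foldl (buildPalindrome_altStep idx m) none = none := by
  induction ks with
  | nil => rfl
  | cons k ks ih => simpa [buildPalindrome_altStep] using ih

theorem pv_rqm_fold_length (n : Nat) (ks : List Nat) : ∀ (vals w : List Char),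
    ks.foldl (buildPalindrome_rqmStep n) (some vals) = some w → w.length = vals.length := by
  induction ks with
  | nil => intro vals w h; simp at h; rw [h]
  | cons k ks ih =>
      intro vals w h
      simp only [List.foldl_cons] at h
      cases hstep : buildPalindrome_rqmStep n (some vals) k with
      | none => rw [hstep, pv_rqm_fold_none] at h; exact absurd h (by simp)
      | some w' =>
          rw [hstep] at h
          have := ih w' w h
          have := pv_rqmStep_length n vals w' k hstep
          omega

-- one loop step of B simulates one loop step of A through pvSplice
theorem pv_step_corr (l0 : List Char) (vals : List Char) (k : Nat)
    (hm : vals.length = (buildPalindrome_altIdx l0 0).length)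
    (hk : k < (buildPalindrome_altIdx l0 0).length / 2) :
    buildPalindrome_altStep (buildPalindrome_altIdx l0 0) (buildPalindrome_altIdx l0 0).length
      (some (pvSplice l0 vals)) k
    = Option.map (pvSplice l0)
        (buildPalindrome_rqmStep (buildPalindrome_altIdx l0 0).length (some vals) k) := by
  have hk1 : k < vals.length := by omega
  have hk2 : (buildPalindrome_altIdx l0 0).length - k - 1 < vals.length := by omega
  have hsub : (buildPalindrome_altIdx l0 0).length - 1 - k
      = (buildPalindrome_altIdx l0 0).length - k - 1 := by omega
  simp only [buildPalindrome_altStep, buildPalindrome_rqmStep]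
  rw [hsub, pv_splice_getD l0 vals k ' ' hm hk1,
    pv_splice_getD l0 vals ((buildPalindrome_altIdx l0 0).length - k - 1) ' ' hm hk2]
  by_cases h1 : vals.getD k ' ' = '?' ∧
      vals.getD ((buildPalindrome_altIdx l0 0).length - k - 1) ' ' = '?'
  · simp only [if_pos h1, Option.map_some]
    rw [pv_splice_set l0 vals k 'a' hm hk1,
      pv_splice_set l0 (vals.set k 'a') ((buildPalindrome_altIdx l0 0).length - k - 1) 'a'
        (by simpa using hm) (by simpa using hk2)]
  · simp only [if_neg h1]
    by_cases h2 : vals.getD k ' ' = '?'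
    · simp only [if_pos h2, Option.map_some]
      rw [pv_splice_set l0 vals k _ hm hk1]
    · simp only [if_neg h2]
      by_cases h3 : vals.getD ((buildPalindrome_altIdx l0 0).length - k - 1) ' ' = '?'
      · simp only [if_pos h3, Option.map_some]
        rw [pv_splice_set l0 vals ((buildPalindrome_altIdx l0 0).length - k - 1) _ hm hk2]
      · simp only [if_neg h3]
        by_cases h4 : vals.getD k ' '
            ≠ vals.getD ((buildPalindrome_altIdx l0 0).length - k - 1) ' '
        · simp [h4]
        · simp [h4]

theorem pv_fold_corr (l0 : List Char) (ks : List Nat) : ∀ (vals : List Char),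
    vals.length = (buildPalindrome_altIdx l0 0).length →
    (∀ k ∈ ks, k < (buildPalindrome_altIdx l0 0).length / 2) →
    ks.foldl (buildPalindrome_altStep (buildPalindrome_altIdx l0 0)
        (buildPalindrome_altIdx l0 0).length) (some (pvSplice l0 vals))
    = Option.map (pvSplice l0)
        (ks.foldl (buildPalindrome_rqmStep (buildPalindrome_altIdx l0 0).length) (some vals)) := by
  induction ks with
  | nil => intro vals _ _; simp
  | cons k ks ih =>
      intro vals hm hks
      simp only [List.foldl_cons]
      rw [pv_step_corr l0 vals k hm (hks k (by simp))]
      cases hstep : buildPalindrome_rqmStep (buildPalindrome_altIdx l0 0).length (some vals) k with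
      | none =>
          simp only [Option.map_none]
          rw [pv_alt_fold_none, pv_rqm_fold_none]
          simp
      | some w =>
          simp only [Option.map_some]
          have hw : w.length = (buildPalindrome_altIdx l0 0).length := by
            rw [pv_rqmStep_length _ vals w k hstep]; exact hm
          rw [ih w hw (fun k hk => hks k (by simp [hk]))]

theorem pv_countP_eq (l : List Char) : l.countP pvRel = (buildPalindrome_altIdx l 0).length := by
  rw [pv_idx_length l 0]
  simp [pvCore, List.countP_eq_length_filter]

theorem pv_core_eq (l0 : List Char) : buildPalindrome_core l0 = buildPalindrome_altCore l0 := by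
  have hparsed : buildPalindrome_fmt l0 = pvCore l0 := pv_fmt_eq l0
  have hplen : (pvCore l0).length = (buildPalindrome_altIdx l0 0).length :=
    (pv_idx_length l0 0).symm
  have hlower : buildPalindrome_altLower l0 = pvSplice l0 (pvCore l0) := pv_lower_splice l0
  have hidxl : buildPalindrome_altIdx (buildPalindrome_altLower l0) 0
      = buildPalindrome_altIdx l0 0 := pv_idx_lower l0 0
  have hfold := pv_fold_corr l0 (List.range ((buildPalindrome_altIdx l0 0).length / 2))
      (pvCore l0) hplen (fun k hk => List.mem_range.1 hk)
  have hrecon : ∀ u : List Char, u.length = (buildPalindrome_altIdx l0 0).length →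
      (l0.foldl (buildPalindrome_reconStep u) ([], 0)).1 = pvSplice l0 u := by
    intro u hu
    have h := pv_recon l0 [] 0 u (by rw [pv_countP_eq]; omega)
    simpa using h
  simp only [buildPalindrome_core, buildPalindrome_altCore, buildPalindrome_rqm]
  rw [hparsed, hidxl, hlower, hplen, hfold]
  cases hA : (List.range ((buildPalindrome_altIdx l0 0).length / 2)).foldl
      (buildPalindrome_rqmStep (buildPalindrome_altIdx l0 0).length) (some (pvCore l0)) with
  | none => simp
  | some w =>
      simp only [Option.map_some]
      have hwlen : w.length = (buildPalindrome_altIdx l0 0).length := by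
        rw [pv_rqm_fold_length _ _ _ _ hA]; exact hplen
      by_cases hodd : (buildPalindrome_altIdx l0 0).length % 2 = 1
      · have hmid : (buildPalindrome_altIdx l0 0).length / 2 < w.length := by omega
        have hgetmid := pv_splice_getD l0 w ((buildPalindrome_altIdx l0 0).length / 2) ' '
          hwlen hmid
        rw [hgetmid]
        by_cases hq : w.getD ((buildPalindrome_altIdx l0 0).length / 2) ' ' = '?'
        · rw [if_pos ⟨hodd, hq⟩, if_pos ⟨hodd, hq⟩,
            pv_splice_set l0 w ((buildPalindrome_altIdx l0 0).length / 2) 'a' hwlen hmid]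
          exact hrecon _ (by simpa using hwlen)
        · rw [if_neg (by tauto), if_neg (by tauto)]
          exact hrecon w hwlen
      · rw [if_neg (by tauto), if_neg (by tauto)]
        exact hrecon w hwlen

-- ===== VERDICT (by name: the statement is the Claim_ definition above) =====
theorem buildPalindrome_spec : Claim_equal_buildPalindrome := by
  intro s _
  unfold Spec_buildPalindrome buildPalindrome buildPalindrome_alt
  rw [pv_core_eq]
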